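-- pv_equiv track=rewrite | github.com/Tom-254/alx-interview | 0x05-nqueens/0-nqueens.py | place_next_queen
-- ===== SOURCE A (Python) =====
-- def is_valid_position(board, row, col):
--     """Check if a position is valid for placing a queen on the board.
--
--     Args:
--         board (list[list[int]]): The current state of the board.
--         row (int): The row to check.
--         col (int): The column to check.
--
--     Returns:
--         bool: True if the position is valid, False otherwise.
--     """
--     b_size = len(board)
--     if sum(board[row]) or sum([board[i][col] for i in range(b_size)]) != 0:
--         return False
--
--     for i, j in [(1, 1), (-1, -1), (1, -1), (-1, 1)]:
--         r, c = row, col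
--         while 0 <= r + i < b_size and 0 <= c + j < b_size:
--             r, c = r + i, c + j
--             if board[r][c]:
--                 return False
--     return True
--
-- def place_next_queen(board, row):
--     """Place a queen on the next row of the board at a valid position.
--
--     Args:
--         board (list[list[int]]): The current state of the board.
--         row (int): The current row to place the queen.
--
--     Returns:
--         bool: True if a valid position was found and a queen was placed, False
--               otherwise.
--     """
--     st, end = 0, len(board)
--     if sum(board[row]) == 1:
--         st = board[row].index(1) + 1
--         board[row] = [0 for col in range(end)]
--
--     for col in range(st, end):
--         if is_valid_position(board, row, col):
--             board[row][col] = 1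
--             return True
--     return False
-- ===== SOURCE B (Python) =====
-- def place_next_queen(board, row):
--     """Place a queen at the first valid column of `row`, resuming past an
--     existing single queen (which is removed first, as in the original).
--     Mutates board in place the same way as the original."""
--     n = len(board)
--     st = 0
--     if sum(board[row]) == 1:
--         st = board[row].index(1) + 1
--         board[row] = [0 for _ in range(n)]
--     if sum(board[row]) != 0:
--         return False
--     col_sums = [sum(board[r][c] for r in range(n)) for c in range(n)]
--     major = {r - c for r in range(n) for c in range(n) if r != row and board[r][c]}
--     minor = {r + c for r in range(n) for c in range(n) if r != row and board[r][c]}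
--     for col in range(st, n):
--         if col_sums[col] == 0 and (row - col) not in major and (row + col) not in minor:
--             board[row][col] = 1
--             return True
--     return False
-- ===== Notes on version B (the rewrite author's own statement) =====
-- stated objective: alternative
-- what changed: Replaces A's per-candidate rescans (a column sum and four step-by-step diagonal walks for every candidate column) by one precomputed column-sum table and two sets of occupied diagonal keys (r-c and r+c), so each candidate column is tested by table/set lookups.
-- outside the precondition, e.g. on place_next_queen([[0, -1, 1], [0, 1, -1], [0, 1, -1]], -2): A returns True, B returns False; on place_next_queen([[0, 1], [0]], 0): A returns False, B raises IndexError
import Mathlib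
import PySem

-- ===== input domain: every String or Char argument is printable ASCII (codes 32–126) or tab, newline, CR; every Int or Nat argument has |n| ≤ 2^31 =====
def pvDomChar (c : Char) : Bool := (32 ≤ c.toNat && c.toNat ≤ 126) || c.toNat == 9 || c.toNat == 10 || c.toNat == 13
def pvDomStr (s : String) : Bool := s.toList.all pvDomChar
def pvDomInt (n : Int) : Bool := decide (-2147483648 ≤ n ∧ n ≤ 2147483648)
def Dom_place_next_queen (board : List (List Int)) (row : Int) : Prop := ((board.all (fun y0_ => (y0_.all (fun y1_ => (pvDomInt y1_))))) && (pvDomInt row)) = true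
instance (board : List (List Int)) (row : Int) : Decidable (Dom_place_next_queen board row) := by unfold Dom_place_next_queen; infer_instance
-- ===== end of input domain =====

-- B replaces A's per-candidate column-sum recomputation and four diagonal walks by one
-- precomputed column-sum table plus two sets of occupied diagonal keys (r-c / r+c), so each
-- candidate column is tested by table/set lookups (objective: alternative algorithm).
-- Both A and B mutate `board` in place the same way; the theorems are about the return value.

-- ===== PORT A =====
-- board[i] (negative wraparound; default only reached outside Pre_)
def pvRowAt (board : List (List Int)) (i : Int) : List Int := (PySem.List.pyGet? board i).getD []
-- board[r][c]
def pvCell (board : List (List Int)) (r c : Int) : Int := PySem.List.pyGetD (pvRowAt board r) c 0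
-- the `while 0 <= r+i < b_size and 0 <= c+j < b_size` walk of is_valid_position;
-- fuel = b_size bounds the walk (each step moves r one cell inside [0, b_size))
def pvWalk (board : List (List Int)) (n i j : Int) : Nat → Int → Int → Bool
  | 0, _, _ => false
  | fuel+1, r, c =>
    if 0 ≤ r + i ∧ r + i < n ∧ 0 ≤ c + j ∧ c + j < n then
      if pvCell board (r+i) (c+j) ≠ 0 then true
      else pvWalk board n i j fuel (r+i) (c+j)
    else false
-- is_valid_position
def pvIsValid (board : List (List Int)) (row col : Int) : Bool :=
  let n : Int := (board.length : Int)
  if (pvRowAt board row).sum ≠ 0 ∨ ((PySem.List.pyRange 0 n 1).map (fun i => pvCell board i col)).sum ≠ 0 then false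
  else if ([((1:Int),(1:Int)), (-1,-1), (1,-1), (-1,1)]).any (fun p => pvWalk board n p.1 p.2 board.length row col) then false
  else true
-- the shared prologue of A and B: st and the (possibly row-cleared) board
def pvPrep (board : List (List Int)) (row : Int) : Int × List (List Int) :=
  if (pvRowAt board row).sum = 1 then
    ((((PySem.List.index? (pvRowAt board row) 1).getD 0 : Nat) : Int) + 1,
      board.set row.toNat (List.replicate board.length (0:Int)))
  else (0, board)
def place_next_queen (board : List (List Int)) (row : Int) : Bool :=
  let p := pvPrep board row
  (PySem.List.pyRange p.1 (board.length : Int) 1).any (fun col => pvIsValid p.2 row col)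

-- ===== PORT B =====
-- col_sums = [sum(board[r][c] for r in range(n)) for c in range(n)]
def pvColSums (b : List (List Int)) : List Int :=
  (PySem.List.pyRange 0 (b.length : Int) 1).map (fun c =>
    ((PySem.List.pyRange 0 (b.length : Int) 1).map (fun r => pvCell b r c)).sum)
-- {f(r,c) for r in range(n) for c in range(n) if r != row and board[r][c]}  (f = r-c resp. r+c)
def pvDiagKeys (b : List (List Int)) (row : Int) (f : Int → Int → Int) : PySem.Set Int :=
  PySem.Set.ofList ((PySem.List.pyRange 0 (b.length : Int) 1).flatMap (fun r =>
    ((PySem.List.pyRange 0 (b.length : Int) 1).filter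
      (fun c => decide (r ≠ row ∧ pvCell b r c ≠ 0))).map (fun c => f r c)))
def place_next_queen_alt (board : List (List Int)) (row : Int) : Bool :=
  let p := pvPrep board row
  let b := p.2
  if (pvRowAt b row).sum ≠ 0 then false
  else
    let colSums := pvColSums b
    let major := pvDiagKeys b row (fun r c => r - c)
    let minor := pvDiagKeys b row (fun r c => r + c)
    (PySem.List.pyRange p.1 (board.length : Int) 1).any (fun col =>
      decide (PySem.List.pyGetD colSums col 0 = 0)
        && !(PySem.Set.contains major (row - col)) && !(PySem.Set.contains minor (row + col)))

-- ===== PRECONDITION & SPEC =====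
-- Pre_ excludes: negative row indices (A's Python wraps the row lookup but its diagonal
-- walks then start out of bounds, an accidental behaviour B does not reproduce); rows whose
-- sum is 1 without containing a literal 1 (A raises ValueError); and ragged (non-square)
-- boards except the harmless case sum(board[row]) ∉ {0,1}, because on ragged boards A's
-- column scan can raise IndexError or depend on raggedness.
def Pre_place_next_queen (board : List (List Int)) (row : Int) : Prop :=
  0 ≤ row ∧ row < (board.length : Int) ∧
  ((∀ r ∈ board, r.length = board.length) ∨
    (((PySem.List.pyGet? board row).getD []).sum ≠ 0 ∧ ((PySem.List.pyGet? board row).getD []).sum ≠ 1)) ∧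
  (((PySem.List.pyGet? board row).getD []).sum = 1 → (1:Int) ∈ (PySem.List.pyGet? board row).getD [])
instance (board : List (List Int)) (row : Int) : Decidable (Pre_place_next_queen board row) := by
  unfold Pre_place_next_queen; infer_instance
def pvWitness_place_next_queen : List (List Int) × Int := ([[0, 0], [0, 0]], 0)
def Spec_place_next_queen (board : List (List Int)) (row : Int) (out : Bool) : Prop := out = place_next_queen_alt board row
instance (board : List (List Int)) (row : Int) (out : Bool) : Decidable (Spec_place_next_queen board row out) := by unfold Spec_place_next_queen; infer_instance

-- ===== CLAIM (what is proved, stated in full; the proofs are below) =====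
def Claim_equal_place_next_queen : Prop := ∀ (board : List (List Int)) (row : Int), Dom_place_next_queen board row → Pre_place_next_queen board row → Spec_place_next_queen board row (place_next_queen board row)

-- ===== LEMMAS AND PROOFS =====

-- if the current row has nonzero sum, is_valid_position is False at every column
lemma pvIsValid_false_of_rowsum (b : List (List Int)) (row col : Int)
    (h : (pvRowAt b row).sum ≠ 0) : pvIsValid b row col = false := by
  simp [pvIsValid, h]

-- characterisation of the diagonal walk
lemma pvWalk_true_iff (b : List (List Int)) (i j : Int)
    (hi : i = 1 ∨ i = -1) (hj : j = 1 ∨ j = -1) :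
    ∀ (fuel : Nat) (r c : Int), 0 ≤ r → r < (b.length : Int) → 0 ≤ c → c < (b.length : Int) →
    (pvWalk b (b.length : Int) i j fuel r c = true ↔
      ∃ k : Nat, 1 ≤ k ∧ k ≤ fuel ∧
        0 ≤ r + k * i ∧ r + k * i < (b.length : Int) ∧
        0 ≤ c + k * j ∧ c + k * j < (b.length : Int) ∧
        pvCell b (r + k * i) (c + k * j) ≠ 0) := by
  intro fuel
  induction fuel with
  | zero =>
    intro r c _ _ _ _
    simp [pvWalk]
  | succ fuel ih =>
    intro r c hr0 hr1 hc0 hc1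
    rw [pvWalk]
    by_cases hg : 0 ≤ r + i ∧ r + i < (b.length : Int) ∧ 0 ≤ c + j ∧ c + j < (b.length : Int)
    · rw [if_pos hg]
      by_cases hcell : pvCell b (r+i) (c+j) ≠ 0
      · rw [if_pos hcell]
        simp only [true_iff]
        refine ⟨1, le_refl 1, by omega, ?_⟩
        push_cast
        simp only [one_mul]
        exact ⟨hg.1, hg.2.1, hg.2.2.1, hg.2.2.2, hcell⟩
      · rw [if_neg hcell]
        push Not at hcell
        rw [ih (r+i) (c+j) hg.1 hg.2.1 hg.2.2.1 hg.2.2.2]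
        constructor
        · rintro ⟨k, hk1, hk2, p1, p2, p3, p4, pc⟩
          refine ⟨k+1, by omega, by omega, ?_⟩
          have e1 : r + (↑(k+1) : Int) * i = r + i + (k : Int) * i := by push_cast; ring
          have e2 : c + (↑(k+1) : Int) * j = c + j + (k : Int) * j := by push_cast; ring
          rw [e1, e2]
          exact ⟨p1, p2, p3, p4, pc⟩
        · rintro ⟨k, hk1, hk2, p1, p2, p3, p4, pc⟩
          have hk1' : 2 ≤ k := by
            rcases Nat.eq_or_lt_of_le hk1 with h1 | h1
            · exfalso
              apply pc
              have e1 : r + (↑k : Int) * i = r + i := by rw [← h1]; push_cast; ring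
              have e2 : c + (↑k : Int) * j = c + j := by rw [← h1]; push_cast; ring
              rw [e1, e2, hcell]
            · omega
          refine ⟨k-1, by omega, by omega, ?_⟩
          have e1 : r + i + (↑(k-1) : Int) * i = r + (k : Int) * i := by
            have : ((k-1 : Nat) : Int) = (k : Int) - 1 := by omega
            rw [this]; ring
          have e2 : c + j + (↑(k-1) : Int) * j = c + (k : Int) * j := by
            have : ((k-1 : Nat) : Int) = (k : Int) - 1 := by omega
            rw [this]; ring
          rw [e1, e2]
          exact ⟨p1, p2, p3, p4, pc⟩
    · rw [if_neg hg]
      simp only [Bool.false_eq_true, false_iff]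
      rintro ⟨k, hk1, hk2, p1, p2, p3, p4, pc⟩
      apply hg
      have hk : 1 ≤ (k : Int) := by omega
      rcases hi with rfl | rfl <;> rcases hj with rfl | rfl <;> omega

-- the four walks together see exactly the off-row cells sharing a diagonal with (row, col)
lemma pvDiagAny_iff (b : List (List Int)) (row col : Int)
    (hr0 : 0 ≤ row) (hr1 : row < (b.length : Int)) (hc0 : 0 ≤ col) (hc1 : col < (b.length : Int)) :
    (([((1:Int),(1:Int)), (-1,-1), (1,-1), (-1,1)]).any
        (fun p => pvWalk b (b.length : Int) p.1 p.2 b.length row col) = true ↔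
      ∃ r c : Int, 0 ≤ r ∧ r < (b.length : Int) ∧ 0 ≤ c ∧ c < (b.length : Int) ∧
        r ≠ row ∧ pvCell b r c ≠ 0 ∧ (r - c = row - col ∨ r + c = row + col)) := by
  simp only [List.any_cons, List.any_nil, Bool.or_eq_true, Bool.false_eq_true, or_false]
  rw [pvWalk_true_iff b 1 1 (Or.inl rfl) (Or.inl rfl) b.length row col hr0 hr1 hc0 hc1,
      pvWalk_true_iff b (-1) (-1) (Or.inr rfl) (Or.inr rfl) b.length row col hr0 hr1 hc0 hc1,
      pvWalk_true_iff b 1 (-1) (Or.inl rfl) (Or.inr rfl) b.length row col hr0 hr1 hc0 hc1,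
      pvWalk_true_iff b (-1) 1 (Or.inr rfl) (Or.inl rfl) b.length row col hr0 hr1 hc0 hc1]
  constructor
  · rintro (⟨k,hk1,hk2,p1,p2,p3,p4,pc⟩ | ⟨k,hk1,hk2,p1,p2,p3,p4,pc⟩ |
            ⟨k,hk1,hk2,p1,p2,p3,p4,pc⟩ | ⟨k,hk1,hk2,p1,p2,p3,p4,pc⟩)
    · exact ⟨row + k * 1, col + k * 1, p1, p2, p3, p4, by omega, pc, Or.inl (by ring)⟩
    · exact ⟨row + k * (-1), col + k * (-1), p1, p2, p3, p4, by omega, pc, Or.inl (by ring)⟩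
    · exact ⟨row + k * 1, col + k * (-1), p1, p2, p3, p4, by omega, pc, Or.inr (by ring)⟩
    · exact ⟨row + k * (-1), col + k * 1, p1, p2, p3, p4, by omega, pc, Or.inr (by ring)⟩
  · rintro ⟨r, c, hr0', hr1', hc0', hc1', hne, pc, hd | hd⟩
    · rcases lt_or_gt_of_ne hne with hlt | hgt
      · refine Or.inr (Or.inl ⟨(row - r).toNat, by omega, by omega, ?_⟩)
        have er : row + ((row - r).toNat : Int) * (-1) = r := by omega
        have ec : col + ((row - r).toNat : Int) * (-1) = c := by omega
        rw [er, ec]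
        exact ⟨hr0', hr1', hc0', hc1', pc⟩
      · refine Or.inl ⟨(r - row).toNat, by omega, by omega, ?_⟩
        have er : row + ((r - row).toNat : Int) * 1 = r := by omega
        have ec : col + ((r - row).toNat : Int) * 1 = c := by omega
        rw [er, ec]
        exact ⟨hr0', hr1', hc0', hc1', pc⟩
    · rcases lt_or_gt_of_ne hne with hlt | hgt
      · refine Or.inr (Or.inr (Or.inr ⟨(row - r).toNat, by omega, by omega, ?_⟩))
        have er : row + ((row - r).toNat : Int) * (-1) = r := by omega
        have ec : col + ((row - r).toNat : Int) * 1 = c := by omega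
        rw [er, ec]
        exact ⟨hr0', hr1', hc0', hc1', pc⟩
      · refine Or.inr (Or.inr (Or.inl ⟨(r - row).toNat, by omega, by omega, ?_⟩))
        have er : row + ((r - row).toNat : Int) * 1 = r := by omega
        have ec : col + ((r - row).toNat : Int) * (-1) = c := by omega
        rw [er, ec]
        exact ⟨hr0', hr1', hc0', hc1', pc⟩

-- membership in B's diagonal-key sets
lemma pvDiagKeys_contains_iff (b : List (List Int)) (row x : Int) (f : Int → Int → Int) :
    (PySem.Set.contains (pvDiagKeys b row f) x = true ↔
      ∃ r c : Int, 0 ≤ r ∧ r < (b.length : Int) ∧ 0 ≤ c ∧ c < (b.length : Int) ∧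
        r ≠ row ∧ pvCell b r c ≠ 0 ∧ x = f r c) := by
  rw [PySem.Set.contains_iff]
  simp only [pvDiagKeys, PySem.Set.mem_ofList, List.mem_flatMap, List.mem_map, List.mem_filter,
    PySem.List.mem_pyRange_one, decide_eq_true_eq]
  constructor
  · rintro ⟨r, ⟨hr0, hr1⟩, c, ⟨⟨hc0, hc1⟩, hne, hcell⟩, hx⟩
    exact ⟨r, c, hr0, hr1, hc0, hc1, hne, hcell, hx.symm⟩
  · rintro ⟨r, c, hr0, hr1, hc0, hc1, hne, hcell, hx⟩
    exact ⟨r, ⟨hr0, hr1⟩, c, ⟨⟨hc0, hc1⟩, hne, hcell⟩, hx.symm⟩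

-- B's cached column sum agrees with A's recomputed one
lemma pvColSums_get (b : List (List Int)) (col : Int) (hc0 : 0 ≤ col) (hc1 : col < (b.length : Int)) :
    PySem.List.pyGetD (pvColSums b) col 0 =
      ((PySem.List.pyRange 0 (b.length : Int) 1).map (fun r => pvCell b r col)).sum := by
  have hcol : col = ((col.toNat : Nat) : Int) := by omega
  rw [pvColSums, hcol, PySem.List.pyGetD_map_pyRange _ b.length col.toNat 0 (by omega)]

-- pointwise: A's validity test equals B's table/set test
lemma pv_pointwise (b : List (List Int)) (row col : Int)
    (hr0 : 0 ≤ row) (hr1 : row < (b.length : Int)) (hc0 : 0 ≤ col) (hc1 : col < (b.length : Int))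
    (hsum : (pvRowAt b row).sum = 0) :
    pvIsValid b row col =
      (decide (PySem.List.pyGetD (pvColSums b) col 0 = 0)
        && !(PySem.Set.contains (pvDiagKeys b row (fun r c => r - c)) (row - col))
        && !(PySem.Set.contains (pvDiagKeys b row (fun r c => r + c)) (row + col))) := by
  rw [pvColSums_get b col hc0 hc1]
  by_cases hcs : ((PySem.List.pyRange 0 (b.length : Int) 1).map (fun r => pvCell b r col)).sum = 0
  · have hkey : (([((1:Int),(1:Int)), (-1,-1), (1,-1), (-1,1)]).any
        (fun p => pvWalk b (b.length : Int) p.1 p.2 b.length row col) = true) ↔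
        (PySem.Set.contains (pvDiagKeys b row (fun r c => r - c)) (row - col) = true ∨
         PySem.Set.contains (pvDiagKeys b row (fun r c => r + c)) (row + col) = true) := by
      rw [pvDiagAny_iff b row col hr0 hr1 hc0 hc1,
          pvDiagKeys_contains_iff b row (row - col) (fun r c => r - c),
          pvDiagKeys_contains_iff b row (row + col) (fun r c => r + c)]
      constructor
      · rintro ⟨r, c, h1, h2, h3, h4, h5, h6, hd | hd⟩
        · exact Or.inl ⟨r, c, h1, h2, h3, h4, h5, h6, by omega⟩
        · exact Or.inr ⟨r, c, h1, h2, h3, h4, h5, h6, by omega⟩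
      · rintro (⟨r, c, h1, h2, h3, h4, h5, h6, hx⟩ | ⟨r, c, h1, h2, h3, h4, h5, h6, hx⟩)
        · exact ⟨r, c, h1, h2, h3, h4, h5, h6, Or.inl (by omega)⟩
        · exact ⟨r, c, h1, h2, h3, h4, h5, h6, Or.inr (by omega)⟩
    rw [pvIsValid]
    simp only [hsum, hcs, ne_eq, not_true_eq_false, or_self, if_false,
      decide_true, Bool.true_and]
    by_cases hA : ([((1:Int),(1:Int)), (-1,-1), (1,-1), (-1,1)]).any
        (fun p => pvWalk b (b.length : Int) p.1 p.2 b.length row col) = true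
    · rw [if_pos hA]
      rcases hkey.mp hA with h | h
      · simp only [h, Bool.not_true, Bool.false_and]
      · simp only [h, Bool.not_true, Bool.and_false]
    · rw [if_neg hA]
      have := (not_iff_not.mpr hkey).mp hA
      push Not at this
      simp only [Bool.not_eq_true] at this
      simp only [this.1, this.2, Bool.not_false, Bool.and_self]
  · rw [pvIsValid]
    simp only [ne_eq, hcs, not_false_eq_true, or_true, if_true]
    simp


-- both results are False when the (prepared) current row has nonzero sum
lemma pv_bothFalse (b : List (List Int)) (row st : Int)
    (h : (pvRowAt b row).sum ≠ 0) :
    (PySem.List.pyRange st (b.length : Int) 1).any (fun col => pvIsValid b row col) = false := by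
  simp only [List.any_eq_false]
  intro col _
  simp [pvIsValid_false_of_rowsum b row col h]

-- the two scans agree column by column
lemma pv_scan (b : List (List Int)) (row st : Int) (hst : 0 ≤ st)
    (hr0 : 0 ≤ row) (hr1 : row < (b.length : Int))
    (hsum : (pvRowAt b row).sum = 0) :
    (PySem.List.pyRange st (b.length : Int) 1).any (fun col => pvIsValid b row col) =
    (PySem.List.pyRange st (b.length : Int) 1).any (fun col =>
      decide (PySem.List.pyGetD (pvColSums b) col 0 = 0)
        && !(PySem.Set.contains (pvDiagKeys b row (fun r c => r - c)) (row - col))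
        && !(PySem.Set.contains (pvDiagKeys b row (fun r c => r + c)) (row + col))) := by
  apply PySem.List.any_congr_mem
  intro col hcol
  rw [PySem.List.mem_pyRange_one] at hcol
  exact pv_pointwise b row col hr0 hr1 (by omega) hcol.2 hsum

theorem place_next_queen_spec : Claim_equal_place_next_queen := by
  intro board row _ hpre
  obtain ⟨hr0, hr1, hsq, hidx⟩ := hpre
  unfold Spec_place_next_queen place_next_queen place_next_queen_alt
  by_cases h1 : (pvRowAt board row).sum = 1
  · -- the single queen in the row is removed; the cleared row sums to 0
    have hprep : pvPrep board row =
        ((((PySem.List.index? (pvRowAt board row) 1).getD 0 : Nat) : Int) + 1,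
          board.set row.toNat (List.replicate board.length (0:Int))) := by
      rw [pvPrep, if_pos h1]
    rw [hprep]
    simp only
    set b := board.set row.toNat (List.replicate board.length (0:Int)) with hb
    have hlen : b.length = board.length := by simp [hb]
    have hrowb : pvRowAt b row = List.replicate board.length (0:Int) := by
      have hcast : row = ((row.toNat : Nat) : Int) := by omega
      rw [pvRowAt, hcast, PySem.List.pyGet?_natCast]
      rw [hb, List.getElem?_set_self (by omega)]
      rfl
    have hsumb : (pvRowAt b row).sum = 0 := by rw [hrowb]; simp
    rw [if_neg (by simp [hsumb]), ← hlen]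
    exact pv_scan b row _ (by omega) hr0 (by omega) hsumb
  · have hprep : pvPrep board row = (0, board) := by rw [pvPrep, if_neg h1]
    rw [hprep]
    simp only
    by_cases h0 : (pvRowAt board row).sum = 0
    · rw [if_neg (by simp [h0])]
      exact pv_scan board row 0 le_rfl hr0 hr1 h0
    · rw [if_pos (by simp [h0])]
      exact pv_bothFalse board row 0 h0
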